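-- pv_equiv track=rewrite | github.com/Rukilator/Monolith | Tools/translate_mono_final.py | translate_vessel_text
-- ===== SOURCE A (Python) =====
-- def translate_vessel_text(text):
--     """Translate vessel text to Russian."""
--     if not text:
--         return text
--
--     # Simple translations for common terms
--     translations = {
--         "MI": "МИ",
--         "UW": "УВ",
--         "JIN": "ДЖИН",
--         "SKR": "СКР",
--     }
--
--     # Replace prefixes
--     for eng, rus in translations.items():
--         if text.startswith(eng + " "):
--             text = text.replace(eng + " ", rus + " ", 1)
--
--     # This is a placeholder - actual translation would happen here
--     # For now, return as-is
--     return text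
-- ===== SOURCE B (Python) =====
-- TRANSLATIONS = {
--     "MI": "МИ",
--     "UW": "УВ",
--     "JIN": "ДЖИН",
--     "SKR": "СКР",
-- }
--
--
-- def translate_vessel_text(text):
--     """Translate vessel text to Russian."""
--     head, sep, tail = text.partition(' ')
--     if sep and head in TRANSLATIONS:
--         return TRANSLATIONS[head] + ' ' + tail
--     return text
-- ===== Notes on version B (the rewrite author's own statement) =====
-- stated objective: simpler
-- what changed: Instead of scanning all four candidate prefixes with startswith and doing a counted replace for each, B splits the text at the first space with partition and does one direct dictionary lookup on the first token.
import Mathlib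
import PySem

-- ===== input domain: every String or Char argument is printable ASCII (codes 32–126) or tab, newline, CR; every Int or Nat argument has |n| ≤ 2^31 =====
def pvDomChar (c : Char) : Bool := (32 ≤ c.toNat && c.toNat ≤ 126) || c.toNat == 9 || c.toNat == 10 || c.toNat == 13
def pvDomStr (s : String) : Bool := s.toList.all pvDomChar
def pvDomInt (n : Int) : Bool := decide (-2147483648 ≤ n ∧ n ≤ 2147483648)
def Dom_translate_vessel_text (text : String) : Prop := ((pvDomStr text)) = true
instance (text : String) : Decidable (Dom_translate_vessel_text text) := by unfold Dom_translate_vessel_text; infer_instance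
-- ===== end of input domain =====

-- B replaces A's scan over all candidate prefixes (startswith + counted replace per entry) by one
-- partition at the first space and a single dictionary lookup on the first token (objective: simpler).


-- ===== PORT A =====
-- text.replace(old, new, 1): replace the FIRST occurrence of old; hand port, exact for old ≠ []
-- (A only calls it with old = eng + " ", which is nonempty).
def pvReplace1 (s old new : List Char) : List Char :=
  match s with
  | [] => []
  | c :: rest =>
      if s.take old.length = old then new ++ s.drop old.length
      else c :: pvReplace1 rest old new

-- the loop body: if text.startswith(eng + " "): text = text.replace(eng + " ", rus + " ", 1)
def pvStepA (t : List Char) (p : List Char × List Char) : List Char :=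
  if PySem.Chars.startswith t (p.1 ++ [' ']) then pvReplace1 t (p.1 ++ [' ']) (p.2 ++ [' ']) else t

-- translations.items() in insertion order
def pvTransA : List (List Char × List Char) :=
  [("MI".toList, "МИ".toList), ("UW".toList, "УВ".toList),
   ("JIN".toList, "ДЖИН".toList), ("SKR".toList, "СКР".toList)]

def translate_vessel_text (text : String) : String :=
  if text = "" then text
  else String.ofList (pvTransA.foldl pvStepA text.toList)

-- ===== PORT B =====
def pvTransB : PySem.Dict String String :=
  PySem.Dict.ofList [("MI", "МИ"), ("UW", "УВ"), ("JIN", "ДЖИН"), ("SKR", "СКР")]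

-- head, sep, tail = text.partition(' '): split at the FIRST space (sep = '' when there is none)
def translate_vessel_text_alt (text : String) : String :=
  let head := text.toList.takeWhile (· ≠ ' ')
  match text.toList.dropWhile (· ≠ ' ') with
  | [] => text        -- sep == '': no space in text; also covers falsy text == ''
  | _ :: tail =>      -- sep == ' ', tail = rest after the first space
      match pvTransB.get? (String.ofList head) with
      | some rus => rus ++ " " ++ String.ofList tail
      | none => text

-- ===== PRECONDITION & SPEC =====
def Spec_translate_vessel_text (text : String) (out : String) : Prop := out = translate_vessel_text_alt text
instance (text : String) (out : String) : Decidable (Spec_translate_vessel_text text out) := by unfold Spec_translate_vessel_text; infer_instance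

-- ===== CLAIM (what is proved, stated in full; the proofs are below) =====
def Claim_equal_translate_vessel_text : Prop := ∀ (text : String), Dom_translate_vessel_text text → Spec_translate_vessel_text text (translate_vessel_text text)

-- ===== LEMMAS AND PROOFS =====

theorem pvReplace1_prefix (old new t : List Char) (h : old ≠ []) :
    pvReplace1 (old ++ t) old new = new ++ t := by
  cases old with
  | nil => exact absurd rfl h
  | cons c cs => simp [pvReplace1, List.take_left', List.drop_left']

theorem sw_false {a b : Char} (l p : List Char) (hab : a ≠ b) :
    PySem.Chars.startswith (a :: l) (b :: p) = false := by
  rw [Bool.eq_false_iff]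
  intro hsw
  rcases (PySem.Chars.startswith_iff _ _).mp hsw with ⟨u, hu⟩
  exact hab (by injection hu with h1 _; exact h1.symm)

theorem sw_true (p t : List Char) : PySem.Chars.startswith (p ++ t) p = true :=
  (PySem.Chars.startswith_iff _ _).mpr ⟨t, rfl⟩

theorem stepA_skip (l : List Char) (p : List Char × List Char)
    (h : PySem.Chars.startswith l (p.1 ++ [' ']) = false) : pvStepA l p = l := by
  simp [pvStepA, h]

theorem pvFoldMI (t : List Char) :
    pvTransA.foldl pvStepA ("MI ".toList ++ t) = "МИ ".toList ++ t := by
  have h1 : pvStepA ("MI ".toList ++ t) ("MI".toList, "МИ".toList) = 'М'::('И'::(' '::t)) := by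
    simp only [pvStepA]
    rw [show ("MI".toList ++ [' ']) = "MI ".toList from by simp]
    rw [sw_true, if_pos rfl, pvReplace1_prefix _ _ _ (by simp)]
    simp
  have hU : pvStepA ('М'::('И'::(' '::t))) ("UW".toList, "УВ".toList) = 'М'::('И'::(' '::t)) :=
    stepA_skip _ _ (by rw [show ("UW".toList ++ [' ']) = 'U'::('W'::[' ']) from by simp]; exact sw_false _ _ (by decide))
  have hJ : pvStepA ('М'::('И'::(' '::t))) ("JIN".toList, "ДЖИН".toList) = 'М'::('И'::(' '::t)) :=
    stepA_skip _ _ (by rw [show ("JIN".toList ++ [' ']) = 'J'::('I'::('N'::[' '])) from by simp]; exact sw_false _ _ (by decide))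
  have hS : pvStepA ('М'::('И'::(' '::t))) ("SKR".toList, "СКР".toList) = 'М'::('И'::(' '::t)) :=
    stepA_skip _ _ (by rw [show ("SKR".toList ++ [' ']) = 'S'::('K'::('R'::[' '])) from by simp]; exact sw_false _ _ (by decide))
  simp only [pvTransA, List.foldl, h1, hU, hJ, hS]
  simp

theorem pvFoldUW (t : List Char) :
    pvTransA.foldl pvStepA ("UW ".toList ++ t) = "УВ ".toList ++ t := by
  have hM : pvStepA ("UW ".toList ++ t) ("MI".toList, "МИ".toList) = "UW ".toList ++ t :=
    stepA_skip _ _ (by rw [show ("UW ".toList ++ t) = 'U'::('W'::(' '::t)) from by simp,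
      show ("MI".toList ++ [' ']) = 'M'::('I'::[' ']) from by simp]; exact sw_false _ _ (by decide))
  have h1 : pvStepA ("UW ".toList ++ t) ("UW".toList, "УВ".toList) = 'У'::('В'::(' '::t)) := by
    simp only [pvStepA]
    rw [show ("UW".toList ++ [' ']) = "UW ".toList from by simp]
    rw [sw_true, if_pos rfl, pvReplace1_prefix _ _ _ (by simp)]
    simp
  have hJ : pvStepA ('У'::('В'::(' '::t))) ("JIN".toList, "ДЖИН".toList) = 'У'::('В'::(' '::t)) :=
    stepA_skip _ _ (by rw [show ("JIN".toList ++ [' ']) = 'J'::('I'::('N'::[' '])) from by simp]; exact sw_false _ _ (by decide))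
  have hS : pvStepA ('У'::('В'::(' '::t))) ("SKR".toList, "СКР".toList) = 'У'::('В'::(' '::t)) :=
    stepA_skip _ _ (by rw [show ("SKR".toList ++ [' ']) = 'S'::('K'::('R'::[' '])) from by simp]; exact sw_false _ _ (by decide))
  simp only [pvTransA, List.foldl, hM, h1, hJ, hS]
  simp

theorem pvFoldJIN (t : List Char) :
    pvTransA.foldl pvStepA ("JIN ".toList ++ t) = "ДЖИН ".toList ++ t := by
  have hM : pvStepA ("JIN ".toList ++ t) ("MI".toList, "МИ".toList) = "JIN ".toList ++ t :=
    stepA_skip _ _ (by rw [show ("JIN ".toList ++ t) = 'J'::('I'::('N'::(' '::t))) from by simp,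
      show ("MI".toList ++ [' ']) = 'M'::('I'::[' ']) from by simp]; exact sw_false _ _ (by decide))
  have hU : pvStepA ("JIN ".toList ++ t) ("UW".toList, "УВ".toList) = "JIN ".toList ++ t :=
    stepA_skip _ _ (by rw [show ("JIN ".toList ++ t) = 'J'::('I'::('N'::(' '::t))) from by simp,
      show ("UW".toList ++ [' ']) = 'U'::('W'::[' ']) from by simp]; exact sw_false _ _ (by decide))
  have h1 : pvStepA ("JIN ".toList ++ t) ("JIN".toList, "ДЖИН".toList) = 'Д'::('Ж'::('И'::('Н'::(' '::t)))) := by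
    simp only [pvStepA]
    rw [show ("JIN".toList ++ [' ']) = "JIN ".toList from by simp]
    rw [sw_true, if_pos rfl, pvReplace1_prefix _ _ _ (by simp)]
    simp
  have hS : pvStepA ('Д'::('Ж'::('И'::('Н'::(' '::t))))) ("SKR".toList, "СКР".toList) = 'Д'::('Ж'::('И'::('Н'::(' '::t)))) :=
    stepA_skip _ _ (by rw [show ("SKR".toList ++ [' ']) = 'S'::('K'::('R'::[' '])) from by simp]; exact sw_false _ _ (by decide))
  simp only [pvTransA, List.foldl, hM, hU, h1, hS]
  simp

theorem pvFoldSKR (t : List Char) :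
    pvTransA.foldl pvStepA ("SKR ".toList ++ t) = "СКР ".toList ++ t := by
  have hM : pvStepA ("SKR ".toList ++ t) ("MI".toList, "МИ".toList) = "SKR ".toList ++ t :=
    stepA_skip _ _ (by rw [show ("SKR ".toList ++ t) = 'S'::('K'::('R'::(' '::t))) from by simp,
      show ("MI".toList ++ [' ']) = 'M'::('I'::[' ']) from by simp]; exact sw_false _ _ (by decide))
  have hU : pvStepA ("SKR ".toList ++ t) ("UW".toList, "УВ".toList) = "SKR ".toList ++ t :=
    stepA_skip _ _ (by rw [show ("SKR ".toList ++ t) = 'S'::('K'::('R'::(' '::t))) from by simp,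
      show ("UW".toList ++ [' ']) = 'U'::('W'::[' ']) from by simp]; exact sw_false _ _ (by decide))
  have hJ : pvStepA ("SKR ".toList ++ t) ("JIN".toList, "ДЖИН".toList) = "SKR ".toList ++ t :=
    stepA_skip _ _ (by rw [show ("SKR ".toList ++ t) = 'S'::('K'::('R'::(' '::t))) from by simp,
      show ("JIN".toList ++ [' ']) = 'J'::('I'::('N'::[' '])) from by simp]; exact sw_false _ _ (by decide))
  have h1 : pvStepA ("SKR ".toList ++ t) ("SKR".toList, "СКР".toList) = 'С'::('К'::('Р'::(' '::t))) := by
    simp only [pvStepA]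
    rw [show ("SKR".toList ++ [' ']) = "SKR ".toList from by simp]
    rw [sw_true, if_pos rfl, pvReplace1_prefix _ _ _ (by simp)]
    simp
  simp only [pvTransA, List.foldl, hM, hU, hJ, h1]
  simp

theorem pvFoldNone (l : List Char)
    (hMI : ¬ "MI ".toList <+: l) (hUW : ¬ "UW ".toList <+: l)
    (hJIN : ¬ "JIN ".toList <+: l) (hSKR : ¬ "SKR ".toList <+: l) :
    pvTransA.foldl pvStepA l = l := by
  have sw : ∀ p : List Char, ¬ p <+: l → PySem.Chars.startswith l p = false := by
    intro p hp
    rw [Bool.eq_false_iff]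
    intro h
    exact hp ((PySem.Chars.startswith_iff _ _).mp h)
  have hM := stepA_skip l ("MI".toList, "МИ".toList)
    (by rw [show ("MI".toList ++ [' ']) = "MI ".toList from by simp]; exact sw _ hMI)
  have hU := stepA_skip l ("UW".toList, "УВ".toList)
    (by rw [show ("UW".toList ++ [' ']) = "UW ".toList from by simp]; exact sw _ hUW)
  have hJ := stepA_skip l ("JIN".toList, "ДЖИН".toList)
    (by rw [show ("JIN".toList ++ [' ']) = "JIN ".toList from by simp]; exact sw _ hJIN)
  have hS := stepA_skip l ("SKR".toList, "СКР".toList)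
    (by rw [show ("SKR".toList ++ [' ']) = "SKR ".toList from by simp]; exact sw _ hSKR)
  simp only [pvTransA, List.foldl, hM, hU, hJ, hS]

theorem dropWhile_cons_space (c : Char) (t : List Char) :
    ∀ l : List Char, l.dropWhile (· ≠ ' ') = c :: t → c = ' ' := by
  intro l
  induction l with
  | nil => intro h; cases h
  | cons a l ih =>
      intro h
      rw [List.dropWhile_cons] at h
      split at h
      · exact ih h
      · next hne =>
          injection h with h1 _
          subst h1
          simpa using hne

-- ===== VERDICT (by name: the statement is the Claim_ definition above) =====
theorem translate_vessel_text_spec : Claim_equal_translate_vessel_text := by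
  intro text _
  unfold Spec_translate_vessel_text translate_vessel_text translate_vessel_text_alt
  by_cases hMI : "MI ".toList <+: text.toList
  · obtain ⟨t, ht⟩ := hMI
    have hne : text ≠ "" := by intro h; rw [h] at ht; simp at ht
    rw [if_neg hne, ← ht, pvFoldMI,
        show ("MI ".toList ++ t) = 'M'::('I'::(' '::t)) from by simp]
    have hg : pvTransB.get? "MI" = some "МИ" := by decide
    simp only [List.takeWhile_cons, List.dropWhile_cons]
    norm_num [hg]
    apply String.ext
    simp [hg]
  by_cases hUW : "UW ".toList <+: text.toList
  · obtain ⟨t, ht⟩ := hUW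
    have hne : text ≠ "" := by intro h; rw [h] at ht; simp at ht
    rw [if_neg hne, ← ht, pvFoldUW,
        show ("UW ".toList ++ t) = 'U'::('W'::(' '::t)) from by simp]
    have hg : pvTransB.get? "UW" = some "УВ" := by decide
    simp only [List.takeWhile_cons, List.dropWhile_cons]
    norm_num [hg]
    apply String.ext
    simp [hg]
  by_cases hJIN : "JIN ".toList <+: text.toList
  · obtain ⟨t, ht⟩ := hJIN
    have hne : text ≠ "" := by intro h; rw [h] at ht; simp at ht
    rw [if_neg hne, ← ht, pvFoldJIN,
        show ("JIN ".toList ++ t) = 'J'::('I'::('N'::(' '::t))) from by simp]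
    have hg : pvTransB.get? "JIN" = some "ДЖИН" := by decide
    simp only [List.takeWhile_cons, List.dropWhile_cons]
    norm_num [hg]
    apply String.ext
    simp [hg]
  by_cases hSKR : "SKR ".toList <+: text.toList
  · obtain ⟨t, ht⟩ := hSKR
    have hne : text ≠ "" := by intro h; rw [h] at ht; simp at ht
    rw [if_neg hne, ← ht, pvFoldSKR,
        show ("SKR ".toList ++ t) = 'S'::('K'::('R'::(' '::t))) from by simp]
    have hg : pvTransB.get? "SKR" = some "СКР" := by decide
    simp only [List.takeWhile_cons, List.dropWhile_cons]
    norm_num [hg]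
    apply String.ext
    simp [hg]
  -- no candidate prefix matches: both sides return text unchanged
  by_cases h0 : text = ""
  · subst h0
    simp
  · rw [if_neg h0, pvFoldNone _ hMI hUW hJIN hSKR]
    cases hd : text.toList.dropWhile (· ≠ ' ') with
    | nil => simp
    | cons c tail =>
        have hc : c = ' ' := dropWhile_cons_space c tail _ hd
        subst hc
        have hdec : text.toList.takeWhile (· ≠ ' ') ++ (' ' :: tail) = text.toList := by
          rw [← hd]; exact List.takeWhile_append_dropWhile
        have hg : pvTransB.get? (String.ofList (text.toList.takeWhile (· ≠ ' '))) = none := by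
          rw [show pvTransB = PySem.Dict.mk [("MI","МИ"),("UW","УВ"),("JIN","ДЖИН"),("SKR","СКР")] from rfl]
          simp only [PySem.Dict.get?_mk_cons]
          have hkey : ∀ (k : String), k.toList ++ (' ' :: tail) ≠ text.toList →
              (k == String.ofList (text.toList.takeWhile (· ≠ ' '))) = false := by
            intro k hk
            rw [beq_eq_false_iff_ne]
            intro he
            apply hk
            rw [he] at *
            simpa using hdec
          rw [hkey _ (fun h => hMI ⟨tail, h⟩), hkey _ (fun h => hUW ⟨tail, h⟩),
              hkey _ (fun h => hJIN ⟨tail, h⟩), hkey _ (fun h => hSKR ⟨tail, h⟩)]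
          simp [PySem.Dict.get?]
        simp only [ne_eq, decide_not] at hg
        simp [hg]
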